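-- pv_equiv track=rewrite | github.com/Shrihari-I-B/automotive-can-bus-ml-ids-guardian | backend/log_parser.py | check_dos_status
-- ===== SOURCE A (Python) =====
-- from typing import List, Dict, Optional
--
-- def check_dos_status(logs: List[str]) -> bool:
--     """
--     Check if a FLOODING attack is currently active.
--     Logic: Look at the last 10 logs. If we see "FLOODING" and haven't seen "NORMAL"
--     since then, we assume it's active.
--     """
--     # We only care about recent logs to avoid getting stuck in DoS state
--     recent_logs = logs[-20:]
--
--     for line in reversed(recent_logs):
--         if "FLOODING" in line:
--             return True
--         if "NORMAL" in line:
--             return False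
--     return False
-- ===== SOURCE B (Python) =====
-- def check_dos_status(logs):
--     """
--     Check if a FLOODING attack is currently active.
--     Single forward pass over the last 20 logs keeping a boolean state:
--     the last line mentioning FLOODING or NORMAL decides (FLOODING wins
--     within one line); default is False.
--     """
--     active = False
--     for line in logs[-20:]:
--         if "FLOODING" in line:
--             active = True
--         elif "NORMAL" in line:
--             active = False
--     return active
-- ===== Notes on version B (the rewrite author's own statement) =====
-- stated objective: alternative
-- what changed: Replaces the reversed early-return scan with a single forward fold maintaining a boolean state where the last deciding line wins (FLOODING before NORMAL within a line).
import Mathlib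
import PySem

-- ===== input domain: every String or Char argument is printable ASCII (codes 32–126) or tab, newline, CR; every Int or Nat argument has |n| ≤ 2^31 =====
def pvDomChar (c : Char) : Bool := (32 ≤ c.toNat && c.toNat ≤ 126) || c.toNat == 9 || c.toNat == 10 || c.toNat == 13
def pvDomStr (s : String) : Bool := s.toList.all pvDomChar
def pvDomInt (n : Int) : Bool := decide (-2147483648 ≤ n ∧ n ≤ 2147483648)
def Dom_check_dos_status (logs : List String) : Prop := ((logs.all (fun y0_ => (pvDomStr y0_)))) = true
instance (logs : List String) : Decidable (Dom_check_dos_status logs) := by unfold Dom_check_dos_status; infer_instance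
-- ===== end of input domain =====

-- B replaces A's reversed early-return scan by a forward fold with a boolean state (alternative decomposition, same cost).

-- ===== PORT A =====
-- the 'for line in reversed(recent_logs)' loop with its early returns
def pvAScan (lines : List String) : Bool :=
  match lines with
  | [] => false
  | line :: rest =>
    if PySem.Str.isIn "FLOODING" line then true
    else if PySem.Str.isIn "NORMAL" line then false
    else pvAScan rest

def check_dos_status (logs : List String) : Bool :=
  pvAScan (PySem.List.slice logs (some (-20)) none).reverse

-- ===== PORT B =====
def check_dos_status_alt (logs : List String) : Bool :=
  (PySem.List.slice logs (some (-20)) none).foldl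
    (fun active line =>
      if PySem.Str.isIn "FLOODING" line then true
      else if PySem.Str.isIn "NORMAL" line then false
      else active)
    false

-- ===== PRECONDITION & SPEC =====
def Spec_check_dos_status (logs : List String) (out : Bool) : Prop := out = check_dos_status_alt logs
instance (logs : List String) (out : Bool) : Decidable (Spec_check_dos_status logs out) := by unfold Spec_check_dos_status; infer_instance

-- ===== CLAIM (what is proved, stated in full; the proofs are below) =====
def Claim_equal_check_dos_status : Prop := ∀ (logs : List String), Dom_check_dos_status logs → Spec_check_dos_status logs (check_dos_status logs)

-- ===== LEMMAS AND PROOFS =====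

def pvStep (active : Bool) (line : String) : Bool :=
  if PySem.Str.isIn "FLOODING" line then true
  else if PySem.Str.isIn "NORMAL" line then false
  else active

-- A's scan with an explicit default: scanning xs head-first, falling back to s
def pvAScanWith (s : Bool) (lines : List String) : Bool :=
  match lines with
  | [] => s
  | line :: rest =>
    if PySem.Str.isIn "FLOODING" line then true
    else if PySem.Str.isIn "NORMAL" line then false
    else pvAScanWith s rest

theorem pvAScanWith_snoc (s : Bool) (xs : List String) (h : String) :
    pvAScanWith s (xs ++ [h]) = pvAScanWith (pvStep s h) xs := by
  induction xs with
  | nil => simp [pvAScanWith, pvStep]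
  | cons a t ih => simp [pvAScanWith, ih]

theorem pvFoldl_eq_scan (xs : List String) (s : Bool) :
    xs.foldl pvStep s = pvAScanWith s xs.reverse := by
  induction xs generalizing s with
  | nil => simp [pvAScanWith]
  | cons a t ih =>
    simp only [List.foldl_cons, List.reverse_cons, ih, pvAScanWith_snoc]

theorem pvAScanWith_false (xs : List String) : pvAScanWith false xs = pvAScan xs := by
  induction xs with
  | nil => rfl
  | cons a t ih => simp [pvAScanWith, pvAScan, ih]

-- ===== VERDICT (by name: the statement is the Claim_ definition above) =====
theorem check_dos_status_spec : Claim_equal_check_dos_status := by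
  intro logs _
  unfold Spec_check_dos_status check_dos_status check_dos_status_alt
  have := pvFoldl_eq_scan (PySem.List.slice logs (some (-20)) none) false
  rw [pvAScanWith_false] at this
  exact this.symm ▸ rfl
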